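-- pv_equiv track=rewrite | github.com/CoodingPenguin/algorithm-c-sharp | boj/1874_스택수열_1.py | create_commands
-- ===== SOURCE A (Python) =====
-- class Stack:
--   def __init__(self):
--     self.stack = []     # 스택
--     self.commands = []  # 명령어
--
--   def __len__(self):
--     return len(self.stack)
--
--   def append(self, n):
--     self.stack.append(n)
--     self.commands.append("+")
--
--   def pop(self):
--     self.stack.pop()
--     self.commands.append("-")
--
--   def top(self):
--     if self.stack:
--       return self.stack[-1]
--     return None
--
--   def get_commands(self):
--     return self.commands
--
-- def create_commands(n, series):
--   stack = Stack()
--   item, point = 1, 0  # stack 요소, 수열 포인터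
--
--   while item <= n:
--     # 스택의 top과 현재 수열 요소가 같은 경우 스택에서 해당 요소를 꺼낸다
--     if stack.top() == series[point]:
--       stack.pop()
--       point += 1
--     # 다른 경우 요소를 넣는다
--     else:
--       stack.append(item)
--       item += 1
--
--   # 남은 수열 요소도 똑같이 검사
--   while point < n:
--     if stack.top() == series[point]:
--       stack.pop()
--     point += 1
--
--   # 스택이 비어있고 모든 수열을 돌았다면 명령어 로그 반환
--   if not len(stack) and point == n:
--     return stack.get_commands()
--   return None
-- ===== SOURCE B (Python) =====
-- def create_commands(n, series):
--     if n < 0: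
--         return None
--     stack = []
--     commands = []
--     current = 1  # next number to push
--     for x in series[:n]:
--         while (not stack or stack[-1] != x) and current <= n:
--             stack.append(current)
--             commands.append("+")
--             current += 1
--         if stack and stack[-1] == x:
--             stack.pop()
--             commands.append("-")
--         else:
--             return None
--     return commands if not stack else None
-- ===== Notes on version B (the rewrite author's own statement) =====
-- stated objective: simpler
-- what changed: Replaced A's Stack class and two sequential while-loops (push all of 1..n first, then a second scan over leftover positions) by a plain list stack and a single for-loop over the permutation with an inner push-while and an early None return on mismatch.
import Mathlib
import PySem

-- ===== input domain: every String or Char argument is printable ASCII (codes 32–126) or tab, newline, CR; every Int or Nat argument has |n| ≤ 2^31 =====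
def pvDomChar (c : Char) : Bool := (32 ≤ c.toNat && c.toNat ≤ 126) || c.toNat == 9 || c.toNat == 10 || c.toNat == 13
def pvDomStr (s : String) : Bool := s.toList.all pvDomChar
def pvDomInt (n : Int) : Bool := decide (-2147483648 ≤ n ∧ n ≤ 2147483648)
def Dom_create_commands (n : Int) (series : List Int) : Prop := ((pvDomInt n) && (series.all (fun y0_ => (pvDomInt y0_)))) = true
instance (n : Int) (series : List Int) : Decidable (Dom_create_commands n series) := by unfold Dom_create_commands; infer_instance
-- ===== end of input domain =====

-- B replaces A's custom Stack class and two sequential while-loops by a plain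
-- list stack and a single pass over the permutation with an inner push loop
-- (objective: simpler).


-- ===== PORT A =====
-- A's Stack class keeps a list (top = head here) plus a command log; loop1 is
-- A's first while (item <= n), loop2 the second (point < n).  'none' from the
-- loops marks the IndexError of series[point] (excluded by Pre_).
def createLoop1 (n : Int) (series : List Int) (stack : List Int)
    (cmds : List String) (item point : Int) : Option (List Int × List String × Int) :=
  if h : item ≤ n then
    match PySem.List.pyGet? series point with
    | none => none
    | some s =>
      match stack with
      | t :: rest =>
        if t = s then
          createLoop1 n series rest (cmds ++ ["-"]) item (point + 1)
        else
          createLoop1 n series (item :: t :: rest) (cmds ++ ["+"]) (item + 1) point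
      | [] => createLoop1 n series [item] (cmds ++ ["+"]) (item + 1) point
  else
    some (stack, cmds, point)
termination_by ((n + 1 - item).toNat, stack.length)
decreasing_by
  · exact Prod.Lex.right _ (by simp)
  · exact Prod.Lex.left _ _ (by omega)
  · exact Prod.Lex.left _ _ (by omega)

def createLoop2 (n : Int) (series : List Int) (stack : List Int)
    (cmds : List String) (point : Int) : Option (List Int × List String × Int) :=
  if h : point < n then
    match PySem.List.pyGet? series point with
    | none => none
    | some s =>
      match stack with
      | t :: rest =>
        if t = s then createLoop2 n series rest (cmds ++ ["-"]) (point + 1)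
        else createLoop2 n series (t :: rest) cmds (point + 1)
      | [] => createLoop2 n series [] cmds (point + 1)
  else
    some (stack, cmds, point)
termination_by (n - point).toNat
decreasing_by all_goals omega

def create_commands (n : Int) (series : List Int) : Option (List String) :=
  match createLoop1 n series [] [] 1 0 with
  | none => none
  | some (st1, cm1, pt1) =>
    match createLoop2 n series st1 cm1 pt1 with
    | none => none
    | some (st2, cm2, pt2) =>
      if st2 = [] ∧ pt2 = n then some cm2 else none

-- ===== PORT B =====
-- inner 'while (not stack or stack[-1] != x) and current <= n'
def pushUntil (n x : Int) (stack : List Int) (cmds : List String) (cur : Int) :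
    List Int × List String × Int :=
  if h : stack.head? ≠ some x ∧ cur ≤ n then
    pushUntil n x (cur :: stack) (cmds ++ ["+"]) (cur + 1)
  else
    (stack, cmds, cur)
termination_by (n + 1 - cur).toNat
decreasing_by omega

-- 'for x in series[:n]' with the pop-or-fail body and the final emptiness check
def loopB (n : Int) : List Int → List Int → List String → Int → Option (List String)
  | [], stack, cmds, _ => if stack = [] then some cmds else none
  | x :: rest, stack, cmds, cur =>
    match pushUntil n x stack cmds cur with
    | (t :: st', cm, c) => if t = x then loopB n rest st' (cm ++ ["-"]) c else none
    | ([], _, _) => none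

def create_commands_alt (n : Int) (series : List Int) : Option (List String) :=
  if n < 0 then none
  else loopB n (series.take n.toNat) [] [] 1   -- series[:n], n ≥ 0 here

-- ===== PRECONDITION & SPEC =====
-- Pre_ excludes exactly the inputs where A raises IndexError: len(series) < n.
def Pre_create_commands (n : Int) (series : List Int) : Prop := n ≤ (series.length : Int)
instance (n : Int) (series : List Int) : Decidable (Pre_create_commands n series) := by
  unfold Pre_create_commands; infer_instance

def pvWitness_create_commands : Int × List Int := (3, [2, 1, 3])

def Spec_create_commands (n : Int) (series : List Int) (out : Option (List String)) : Prop := out = create_commands_alt n series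
instance (n : Int) (series : List Int) (out : Option (List String)) : Decidable (Spec_create_commands n series out) := by unfold Spec_create_commands; infer_instance

-- ===== CLAIM (what is proved, stated in full; the proofs are below) =====
def Claim_equal_create_commands : Prop := ∀ (n : Int) (series : List Int), Dom_create_commands n series → Pre_create_commands n series → Spec_create_commands n series (create_commands n series)

-- ===== LEMMAS AND PROOFS =====

-- finishing A from the state after loop1
def finishA (n : Int) (series : List Int) (stack : List Int) (cmds : List String)
    (point : Int) : Option (List String) :=
  match createLoop2 n series stack cmds point with
  | none => none
  | some (st2, cm2, pt2) => if st2 = [] ∧ pt2 = n then some cm2 else none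

-- one-step equations for the two loops of A, for B's inner while, and for finishA
lemma createLoop2_exit {n : Int} {series stack : List Int} {cmds : List String} {point : Int}
    (h : ¬ point < n) : createLoop2 n series stack cmds point = some (stack, cmds, point) := by
  rw [createLoop2, dif_neg h]

lemma createLoop2_cons {n : Int} {series : List Int} {point s t : Int} {st : List Int}
    {cmds : List String} (h : point < n) (hget : PySem.List.pyGet? series point = some s) :
    createLoop2 n series (t :: st) cmds point
      = if t = s then createLoop2 n series st (cmds ++ ["-"]) (point + 1)
        else createLoop2 n series (t :: st) cmds (point + 1) := by
  rw [createLoop2, dif_pos h, hget]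

lemma createLoop1_exit {n : Int} {series stack : List Int} {cmds : List String} {item point : Int}
    (h : ¬ item ≤ n) : createLoop1 n series stack cmds item point = some (stack, cmds, point) := by
  rw [createLoop1, dif_neg h]

lemma createLoop1_cons {n : Int} {series : List Int} {item point s t : Int} {st : List Int}
    {cmds : List String} (h : item ≤ n) (hget : PySem.List.pyGet? series point = some s) :
    createLoop1 n series (t :: st) cmds item point
      = if t = s then createLoop1 n series st (cmds ++ ["-"]) item (point + 1)
        else createLoop1 n series (item :: t :: st) (cmds ++ ["+"]) (item + 1) point := by
  rw [createLoop1, dif_pos h, hget]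

lemma createLoop1_nil {n : Int} {series : List Int} {item point s : Int}
    {cmds : List String} (h : item ≤ n) (hget : PySem.List.pyGet? series point = some s) :
    createLoop1 n series [] cmds item point
      = createLoop1 n series [item] (cmds ++ ["+"]) (item + 1) point := by
  rw [createLoop1, dif_pos h, hget]

lemma pushUntil_stop {n x : Int} {stack : List Int} {cmds : List String} {cur : Int}
    (h : ¬ (stack.head? ≠ some x ∧ cur ≤ n)) :
    pushUntil n x stack cmds cur = (stack, cmds, cur) := by
  rw [pushUntil, dif_neg h]

lemma pushUntil_push {n x : Int} {stack : List Int} {cmds : List String} {cur : Int}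
    (h : stack.head? ≠ some x ∧ cur ≤ n) :
    pushUntil n x stack cmds cur = pushUntil n x (cur :: stack) (cmds ++ ["+"]) (cur + 1) := by
  rw [pushUntil, dif_pos h]

lemma loopB_cons {n x : Int} {rest stack : List Int} {cmds : List String} {cur t : Int}
    {st : List Int} {cm : List String} {c : Int}
    (h : pushUntil n x stack cmds cur = (t :: st, cm, c)) :
    loopB n (x :: rest) stack cmds cur
      = if t = x then loopB n rest st (cm ++ ["-"]) c else none := by
  rw [loopB, h]

lemma finishA_cons {n : Int} {series : List Int} {point s t : Int} {st : List Int}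
    {cmds : List String} (h : point < n) (hget : PySem.List.pyGet? series point = some s) :
    finishA n series (t :: st) cmds point
      = if t = s then finishA n series st (cmds ++ ["-"]) (point + 1)
        else finishA n series (t :: st) cmds (point + 1) := by
  unfold finishA
  rw [createLoop2_cons h hget]
  by_cases he : t = s
  · rw [if_pos he, if_pos he]
  · rw [if_neg he, if_neg he]

lemma finishA_exit {n : Int} {series stack : List Int} {cmds : List String} {point : Int}
    (h : ¬ point < n) :
    finishA n series stack cmds point = if stack = [] ∧ point = n then some cmds else none := by
  unfold finishA
  rw [createLoop2_exit h]

-- If the stack is strictly larger than the remaining points, loop2 cannot empty it.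
lemma loop2_overfull (n : Int) (series : List Int) (hlen : n ≤ (series.length : Int)) :
    ∀ k : Nat, ∀ point : Int, (n - point).toNat = k →
    ∀ stack : List Int, ∀ cmds : List String,
    0 ≤ point → point ≤ n → (n - point).toNat < stack.length →
    finishA n series stack cmds point = none := by
  intro k
  induction k with
  | zero =>
    intro point hk stack cmds h0 hpn hlt
    rw [finishA_exit (by omega)]
    have hne : stack ≠ [] := by intro h; subst h; simp at hlt
    simp [hne]
  | succ k ih =>
    intro point hk stack cmds h0 hpn hlt
    have hidx : point.toNat < series.length := by omega
    have hget : PySem.List.pyGet? series point = some series[point.toNat] :=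
      PySem.List.pyGet?_eq_some_getElem series h0 (by omega)
    cases stack with
    | nil => simp at hlt
    | cons t st' =>
      rw [finishA_cons (by omega) hget]
      by_cases he : t = series[point.toNat]
      · rw [if_pos he]
        exact ih (point + 1) (by omega) st' (cmds ++ ["-"]) (by omega) (by omega)
          (by simp at hlt ⊢; omega)
      · rw [if_neg he]
        exact ih (point + 1) (by omega) (t :: st') cmds (by omega) (by omega)
          (by simp at hlt ⊢; omega)

-- Loop2 of A with a stack of exactly the remaining size simulates B's tail with cur = n+1.
lemma loop2_sim (n : Int) (series : List Int) (hlen : n ≤ (series.length : Int)) :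
    ∀ k : Nat, ∀ point : Int, (n - point).toNat = k →
    ∀ stack : List Int, ∀ cmds : List String,
    0 ≤ point → point ≤ n → stack.length = (n - point).toNat →
    finishA n series stack cmds point
      = loopB n ((series.take n.toNat).drop point.toNat) stack cmds (n + 1) := by
  intro k
  induction k with
  | zero =>
    intro point hk stack cmds h0 hpn hlen'
    have hp : point = n := by omega
    have hs : stack = [] := by
      cases stack with | nil => rfl | cons a l => simp at hlen'; omega
    subst hs
    have hdrop : (series.take n.toNat).drop point.toNat = [] := by
      apply List.drop_eq_nil_of_le
      simp; omega
    rw [hdrop, finishA_exit (by omega)]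
    simp [hp, loopB]
  | succ k ih =>
    intro point hk stack cmds h0 hpn hlen'
    have hlt' : point < n := by omega
    have hidx : point.toNat < series.length := by omega
    have hget : PySem.List.pyGet? series point = some series[point.toNat] :=
      PySem.List.pyGet?_eq_some_getElem series h0 (by omega)
    have htk : point.toNat < (series.take n.toNat).length := by simp; omega
    have hdrop : (series.take n.toNat).drop point.toNat
        = series[point.toNat] :: (series.take n.toNat).drop (point.toNat + 1) := by
      rw [List.drop_eq_getElem_cons htk]
      congr 1
      exact List.getElem_take
    obtain ⟨t, st', hst⟩ : ∃ t st', stack = t :: st' := by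
      cases stack with | nil => simp at hlen'; omega | cons a l => exact ⟨a, l, rfl⟩
    subst hst
    rw [hdrop, loopB_cons (pushUntil_stop (by intro h; omega)), finishA_cons hlt' hget]
    by_cases he : t = series[point.toNat]
    · rw [if_pos he, if_pos he]
      rw [ih (point + 1) (by omega) st' (cmds ++ ["-"]) (by omega) (by omega)
        (by simp at hlen' ⊢; omega)]
      congr 2
      omega
    · rw [if_neg he, if_neg he]
      exact loop2_overfull n series hlen (n - (point + 1)).toNat (point + 1) rfl
        (t :: st') cmds (by omega) (by omega) (by simp at hlen' ⊢; omega)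

-- Loop1 of A simulates B as long as item ≤ n, then hands over to loop2_sim.
lemma loop1_sim (n : Int) (series : List Int) (hlen : n ≤ (series.length : Int)) :
    ∀ k : Nat, ∀ item : Int, (n + 1 - item).toNat = k →
    ∀ stack : List Int, ∀ point : Int, ∀ cmds : List String,
    1 ≤ item → item ≤ n + 1 → 0 ≤ point →
    point + (stack.length : Int) = item - 1 →
    (match createLoop1 n series stack cmds item point with
     | none => none
     | some (st1, cm1, pt1) => finishA n series st1 cm1 pt1)
      = loopB n ((series.take n.toNat).drop point.toNat) stack cmds item := by
  intro k
  induction k with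
  | zero =>
    intro item hk stack point cmds h1 hn1 h0 hinv
    have hit : item = n + 1 := by omega
    rw [createLoop1_exit (by omega)]
    show finishA n series stack cmds point
      = loopB n ((series.take n.toNat).drop point.toNat) stack cmds item
    have hlen2 : stack.length = (n - point).toNat := by omega
    rw [loop2_sim n series hlen (n - point).toNat point rfl stack cmds h0 (by omega) hlen2, hit]
  | succ k ih =>
    intro item hk stack
    have hle : item ≤ n := by omega
    induction stack with
    | nil =>
      intro point cmds h1 hn1 h0 hinv
      have hidx : point.toNat < series.length := by omega
      have hget : PySem.List.pyGet? series point = some series[point.toNat] :=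
        PySem.List.pyGet?_eq_some_getElem series h0 (by omega)
      have htk : point.toNat < (series.take n.toNat).length := by simp; omega
      have hdrop : (series.take n.toNat).drop point.toNat
          = series[point.toNat] :: (series.take n.toNat).drop (point.toNat + 1) := by
        rw [List.drop_eq_getElem_cons htk]
        congr 1
        exact List.getElem_take
      rw [createLoop1_nil hle hget, hdrop]
      rw [show loopB n (series[point.toNat] :: (series.take n.toNat).drop (point.toNat + 1))
            [] cmds item
          = loopB n (series[point.toNat] :: (series.take n.toNat).drop (point.toNat + 1))
            [item] (cmds ++ ["+"]) (item + 1) from by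
        rw [loopB, pushUntil_push (by simp; omega), loopB]]
      rw [← hdrop]
      exact ih (item + 1) (by omega) [item] point (cmds ++ ["+"]) (by omega) (by omega) h0
        (by simp at hinv ⊢; omega)
    | cons t st' ihs =>
      intro point cmds h1 hn1 h0 hinv
      have hidx : point.toNat < series.length := by omega
      have hget : PySem.List.pyGet? series point = some series[point.toNat] :=
        PySem.List.pyGet?_eq_some_getElem series h0 (by omega)
      have htk : point.toNat < (series.take n.toNat).length := by simp; omega
      have hdrop : (series.take n.toNat).drop point.toNat
          = series[point.toNat] :: (series.take n.toNat).drop (point.toNat + 1) := by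
        rw [List.drop_eq_getElem_cons htk]
        congr 1
        exact List.getElem_take
      rw [createLoop1_cons hle hget]
      by_cases he : t = series[point.toNat]
      · rw [if_pos he, hdrop,
          loopB_cons (pushUntil_stop (by simp [he])), if_pos he]
        have hswap : ((point : Int) + 1).toNat = point.toNat + 1 := by omega
        rw [← hswap]
        exact ihs (point + 1) (cmds ++ ["-"]) h1 hn1 (by omega) (by simp at hinv ⊢; omega)
      · rw [if_neg he, hdrop]
        rw [show loopB n (series[point.toNat] :: (series.take n.toNat).drop (point.toNat + 1))
              (t :: st') cmds item
            = loopB n (series[point.toNat] :: (series.take n.toNat).drop (point.toNat + 1))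
              (item :: t :: st') (cmds ++ ["+"]) (item + 1) from by
          rw [loopB, pushUntil_push (by simp [he]; omega), loopB]]
        rw [← hdrop]
        exact ih (item + 1) (by omega) (item :: t :: st') point (cmds ++ ["+"]) (by omega)
          (by omega) h0 (by simp at hinv ⊢; omega)

-- ===== VERDICT (by name: the statement is the Claim_ definition above) =====
theorem create_commands_spec : Claim_equal_create_commands := by
  intro n series _ hpre
  unfold Spec_create_commands Pre_create_commands at *
  by_cases hn : n < 0
  · -- n < 0: both loops of A exit at once and the final check 0 = n fails; B returns none
    unfold create_commands create_commands_alt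
    rw [createLoop1_exit (by omega)]
    show (match createLoop2 n series [] [] 0 with
          | none => none
          | some (st2, cm2, pt2) => if st2 = [] ∧ pt2 = n then some cm2 else none)
        = if n < 0 then none else loopB n (series.take n.toNat) [] [] 1
    rw [createLoop2_exit (by omega), if_pos hn]
    simp
    omega
  · have key := loop1_sim n series hpre (n + 1 - 1).toNat 1 rfl [] 0 [] (by omega) (by omega)
      (by omega) (by simp)
    unfold create_commands create_commands_alt
    show (match createLoop1 n series [] [] 1 0 with
          | none => none
          | some (st1, cm1, pt1) => finishA n series st1 cm1 pt1)
        = if n < 0 then none else loopB n (series.take n.toNat) [] [] 1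
    rw [if_neg hn, key]
    norm_num
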